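-- pv_equiv track=rewrite | github.com/Curry30huang/BiasBenchmarkAnonymous | bias_assessment/rct_bias_assessment_copy.py | _fix_json_unescaped_backslashes
-- ===== SOURCE A (Python) =====
-- def _fix_json_unescaped_backslashes(text: str) -> str:
--     """
--     修复JSON字符串值中的未转义反斜杠（更简单但更可靠的方法）
--
--     在JSON字符串值中，反斜杠必须转义为 \\。此函数会修复字符串值内的未转义反斜杠。
--
--     策略：在字符串值内部，将反斜杠后跟非转义字符的情况，转义为 \\。
--
--     Args:
--         text: 需要修复的JSON文本
--
--     Returns:
--         修复后的文本
--     """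
--     result = []
--     i = 0
--     in_string = False
--     escape_count = 0  # 连续反斜杠计数
--
--     while i < len(text):
--         char = text[i]
--
--         # 检测字符串边界（考虑转义的引号）
--         if char == '"':
--             # 计算前面连续反斜杠的数量
--             escape_count = 0
--             j = i - 1
--             while j >= 0 and text[j] == '\\':
--                 escape_count += 1
--                 j -= 1
--
--             # 如果反斜杠数量是偶数，这是字符串边界
--             if escape_count % 2 == 0:
--                 in_string = not in_string
--                 escape_count = 0
--             result.append(char)
--             i += 1
--             continue
--
--         # 在字符串内部处理反斜杠
--         if in_string and char == '\\':
--             # 检查下一个字符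
--             if i + 1 < len(text):
--                 next_char = text[i + 1]
--                 # 有效的JSON转义字符
--                 valid_escapes = ['"', '\\', '/', 'b', 'f', 'n', 'r', 't', 'u']
--                 if next_char in valid_escapes:
--                     # 已经是有效的转义序列，保留
--                     result.append(char)
--                     result.append(next_char)
--                     i += 2
--                 else:
--                     # 无效的转义序列（如 \mathrm），需要转义反斜杠
--                     result.append('\\\\')
--                     i += 1
--             else:
--                 # 反斜杠在末尾，转义它
--                 result.append('\\\\')
--                 i += 1
--             continue
--
--         result.append(char)
--         i += 1
--
--     return ''.join(result)
-- ===== SOURCE B (Python) =====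
-- def _fix_json_unescaped_backslashes(text: str) -> str:
--     """Single-pass DFA: tracks the count of trailing consecutive backslashes
--     incrementally instead of rescanning backwards at every quote, and uses a
--     one-character 'pending escape' state instead of index lookahead."""
--     VALID = '"\\/bfnrtu'
--     out = []
--     in_string = False
--     bs = 0           # consecutive backslashes in text immediately before current char
--     pending = False  # an in-string backslash waiting for its follower
--     for c in text:
--         if pending:
--             pending = False
--             if c in VALID:
--                 out.append('\\')
--                 out.append(c)
--                 bs = bs + 2 if c == '\\' else 0
--                 continue
--             out.append('\\\\')
--             bs += 1
--             # fall through: process c normally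
--         if c == '"':
--             if bs % 2 == 0:
--                 in_string = not in_string
--             out.append(c)
--             bs = 0
--         elif c == '\\':
--             if in_string:
--                 pending = True
--             else:
--                 out.append(c)
--                 bs += 1
--         else:
--             out.append(c)
--             bs = 0
--     if pending:
--         out.append('\\\\')
--     return ''.join(out)
-- ===== Notes on version B (the rewrite author's own statement) =====
-- stated objective: faster
-- what changed: Replaced A's backward rescan of consecutive backslashes at every quote (and its index lookahead) by a single forward pass that maintains the trailing-backslash count incrementally with a one-character pending-escape state.
import Mathlib
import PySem

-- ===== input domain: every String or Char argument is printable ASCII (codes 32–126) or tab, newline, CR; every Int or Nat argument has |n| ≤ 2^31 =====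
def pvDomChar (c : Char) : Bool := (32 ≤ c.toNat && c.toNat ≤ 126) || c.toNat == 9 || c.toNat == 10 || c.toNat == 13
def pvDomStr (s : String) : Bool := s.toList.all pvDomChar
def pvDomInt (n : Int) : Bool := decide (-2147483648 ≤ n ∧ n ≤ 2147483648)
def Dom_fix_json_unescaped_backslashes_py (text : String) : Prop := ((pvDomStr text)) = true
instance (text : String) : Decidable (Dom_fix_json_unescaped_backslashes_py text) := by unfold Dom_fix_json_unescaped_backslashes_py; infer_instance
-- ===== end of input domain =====

-- B replaces A's backward rescan of consecutive backslashes at every quote by a single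
-- forward pass that maintains that count incrementally (objective: faster, O(n) vs O(n^2)).

-- ===== PORT A =====
def pvValidEscapes : List Char := ['"', '\\', '/', 'b', 'f', 'n', 'r', 't', 'u']

-- the inner `while j >= 0 and text[j] == '\\'` backward scan
def pvCountBS (text : List Char) (j : Int) : Nat :=
  if h : 0 ≤ j ∧ PySem.List.pyGet? text j = some '\\' then
    1 + pvCountBS text (j - 1)
  else 0
termination_by (j + 1).toNat
decreasing_by omega

-- the main `while i < len(text)` loop of A (result list built by cons = append+join)
def pvLoopA (text : List Char) (i : Nat) (ins : Bool) : List Char :=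
  if h : i < text.length then
    if text[i] = '"' then
      text[i] :: pvLoopA text (i + 1) (if pvCountBS text ((i : Int) - 1) % 2 = 0 then !ins else ins)
    else if ins ∧ text[i] = '\\' then
      if h2 : i + 1 < text.length then
        if text[i + 1] ∈ pvValidEscapes then
          text[i] :: text[i + 1] :: pvLoopA text (i + 2) ins
        else
          '\\' :: '\\' :: pvLoopA text (i + 1) ins
      else
        '\\' :: '\\' :: pvLoopA text (i + 1) ins
    else
      text[i] :: pvLoopA text (i + 1) ins
  else []
termination_by text.length - i

def fix_json_unescaped_backslashes_py (text : String) : String :=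
  String.mk (pvLoopA text.toList 0 false)

-- ===== PORT B =====
-- one-pass DFA over the characters; `bs` = trailing consecutive backslashes so far,
-- `pending` = an in-string backslash waiting for its follower
def pvLoopB (l : List Char) (ins : Bool) (bs : Nat) (pending : Bool) : List Char :=
  match l, pending with
  | [], p => if p then ['\\', '\\'] else []
  | c :: rest, true =>
    if c ∈ pvValidEscapes then
      '\\' :: c :: pvLoopB rest ins (if c = '\\' then bs + 2 else 0) false
    else
      '\\' :: '\\' :: pvLoopB (c :: rest) ins (bs + 1) false
  | c :: rest, false =>
    if c = '"' then
      c :: pvLoopB rest (if bs % 2 = 0 then !ins else ins) 0 false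
    else if c = '\\' then
      if ins then pvLoopB rest ins bs true
      else c :: pvLoopB rest ins (bs + 1) false
    else
      c :: pvLoopB rest ins 0 false
termination_by (l.length, if pending then 1 else 0)

def fix_json_unescaped_backslashes_py_alt (text : String) : String :=
  String.mk (pvLoopB text.toList false 0 false)

-- ===== PRECONDITION & SPEC =====
def Spec_fix_json_unescaped_backslashes_py (text : String) (out : String) : Prop := out = fix_json_unescaped_backslashes_py_alt text
instance (text : String) (out : String) : Decidable (Spec_fix_json_unescaped_backslashes_py text out) := by unfold Spec_fix_json_unescaped_backslashes_py; infer_instance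

-- ===== CLAIM (what is proved, stated in full; the proofs are below) =====
def Claim_equal_fix_json_unescaped_backslashes_py : Prop := ∀ (text : String), Dom_fix_json_unescaped_backslashes_py text → Spec_fix_json_unescaped_backslashes_py text (fix_json_unescaped_backslashes_py text)

-- ===== LEMMAS AND PROOFS =====

-- trailing consecutive-backslash count of a prefix (B's `bs` invariant)
def pvTbc (l : List Char) : Nat :=
  l.foldl (fun a c => if c = '\\' then a + 1 else 0) 0

theorem pvTbc_append (l : List Char) (c : Char) :
    pvTbc (l ++ [c]) = if c = '\\' then pvTbc l + 1 else 0 := by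
  simp [pvTbc, List.foldl_append]

theorem pvCountBS_eq (text : List Char) :
    ∀ i : Nat, i ≤ text.length → pvCountBS text ((i : Int) - 1) = pvTbc (text.take i) := by
  intro i
  induction i with
  | zero =>
    intro _
    rw [pvCountBS]
    simp [pvTbc]
  | succ k ih =>
    intro hle
    have hk : k < text.length := by omega
    have hget : PySem.List.pyGet? text ((k : Int) + 1 - 1) = some text[k] := by
      simp [PySem.List.pyGet?, PySem.List.pyIdx?, hk]
    have htake : text.take (k + 1) = text.take k ++ [text[k]] := by
      rw [List.take_add_one, List.getElem?_eq_getElem hk]; rfl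
    rw [pvCountBS]
    by_cases hbs : text[k] = '\\'
    · have : (0 : Int) ≤ (k : Int) + 1 - 1 ∧ PySem.List.pyGet? text ((k : Int) + 1 - 1) = some '\\' := by
        refine ⟨by omega, by rw [hget, hbs]⟩
      rw [dif_pos (by push_cast; exact_mod_cast this)]
      have h2 : ((k : Int) + 1 - 1 - 1) = (k : Int) - 1 := by ring
      push_cast
      rw [h2, ih (by omega), htake, pvTbc_append, if_pos hbs]
      omega
    · have hne : ¬ ((0 : Int) ≤ (k : Int) + 1 - 1 ∧ PySem.List.pyGet? text ((k : Int) + 1 - 1) = some '\\') := by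
        rintro ⟨-, h⟩
        rw [hget] at h
        exact hbs (Option.some.injEq _ _ ▸ h)
      rw [dif_neg (by push_cast; exact_mod_cast hne)]
      rw [htake, pvTbc_append, if_neg hbs]

theorem pvDrop_cons (text : List Char) (i : Nat) (h : i < text.length) :
    text.drop i = text[i] :: text.drop (i + 1) :=
  (List.getElem_cons_drop h).symm

theorem pvMain (text : List Char) :
    ∀ k i ins, text.length - i ≤ k →
      pvLoopA text i ins = pvLoopB (text.drop i) ins (pvTbc (text.take i)) false := by
  intro k
  induction k with
  | zero =>
    intro i ins hk
    have hge : text.length ≤ i := by omega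
    rw [pvLoopA, dif_neg (by omega)]
    rw [List.drop_eq_nil_of_le hge, pvLoopB]
    rfl
  | succ m ih =>
    intro i ins hk
    by_cases hi : i < text.length
    case neg =>
      rw [pvLoopA, dif_neg hi]
      rw [List.drop_eq_nil_of_le (by omega), pvLoopB]
      rfl
    case pos =>
    have hdrop := pvDrop_cons text i hi
    have htake : text.take (i + 1) = text.take i ++ [text[i]] := by
      rw [List.take_add_one, List.getElem?_eq_getElem hi]; rfl
    rw [pvLoopA, dif_pos hi]
    by_cases hq : text[i] = '"'
    · -- quote: parity of the backward scan = parity of the tracked count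
      rw [if_pos hq, pvCountBS_eq text i (by omega), hdrop, pvLoopB, hq]
      rw [if_pos rfl]
      have hnb : ¬ text[i] = '\\' := by rw [hq]; decide
      rw [ih (i + 1) _ (by omega), htake, pvTbc_append, if_neg hnb]
    · rw [if_neg hq]
      by_cases hbsl : ins = true ∧ text[i] = '\\'
      · rw [if_pos hbsl]
        obtain ⟨hins, hbs⟩ := hbsl
        rw [hdrop, hbs, pvLoopB]
        rw [if_neg (by decide), if_pos rfl, if_pos hins]
        by_cases h2 : i + 1 < text.length
        · rw [dif_pos h2]
          have hdrop2 := pvDrop_cons text (i + 1) h2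
          have htake2 : text.take (i + 2) = text.take (i + 1) ++ [text[i + 1]] := by
            rw [List.take_add_one, List.getElem?_eq_getElem h2]; rfl
          rw [hdrop2, pvLoopB]
          by_cases hv : text[i + 1] ∈ pvValidEscapes
          · rw [if_pos hv, if_pos hv]
            rw [ih (i + 2) _ (by omega), htake2, pvTbc_append, htake, pvTbc_append,
              if_pos hbs]
          · rw [if_neg hv, if_neg hv]
            rw [ih (i + 1) _ (by omega), htake, pvTbc_append, if_pos hbs, hdrop2]
        · rw [dif_neg h2]
          have hnil : text.drop (i + 1) = [] := List.drop_eq_nil_of_le (by omega)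
          rw [ih (i + 1) _ (by omega), hnil]
          simp [pvLoopB]
      · rw [if_neg hbsl, hdrop, pvLoopB, if_neg hq]
        by_cases hbs : text[i] = '\\'
        · -- backslash outside a string
          have hins : ins = false := by
            cases ins
            · rfl
            · exact absurd ⟨rfl, hbs⟩ hbsl
          subst hins
          rw [if_pos hbs, if_neg (by decide)]
          rw [ih (i + 1) _ (by omega), htake, pvTbc_append, if_pos hbs]
        · rw [if_neg hbs]
          rw [ih (i + 1) _ (by omega), htake, pvTbc_append, if_neg hbs]

-- ===== VERDICT (by name: the statement is the Claim_ definition above) =====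
theorem fix_json_unescaped_backslashes_py_spec : Claim_equal_fix_json_unescaped_backslashes_py := by
  intro text _
  unfold Spec_fix_json_unescaped_backslashes_py fix_json_unescaped_backslashes_py fix_json_unescaped_backslashes_py_alt
  rw [pvMain text.toList text.toList.length 0 false (by omega)]
  simp [pvTbc]
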